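-- pv_equiv track=rewrite | github.com/yangcr12-art/Radar-website | player-web/server/server_core/services/player_dataset_store.py | pick_team_column
-- ===== SOURCE A (Python) =====
-- from typing import Any
--
-- def normalize_header_name(value: Any) -> str:
--     text = str(value or "").strip().lower().replace("_", " ")
--     return " ".join(text.split())
--
-- def pick_team_column(headers: list[str]) -> tuple[int, str]:
--     exact_candidates = {"team", "club", "squad", "球队", "俱乐部"}
--     for idx, header in enumerate(headers):
--         normalized = normalize_header_name(header)
--         if normalized in exact_candidates:
--             return idx, header
--     keyword_candidates = ("team", "club", "squad", "球队", "俱乐部")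
--     for idx, header in enumerate(headers):
--         normalized = normalize_header_name(header)
--         if any(keyword in normalized for keyword in keyword_candidates):
--             return idx, header
--     return -1, ""
-- ===== SOURCE B (Python) =====
-- def normalize_header_name(value) -> str:
--     text = str(value or "").strip().lower().replace("_", " ")
--     return " ".join(text.split())
--
-- def pick_team_column(headers):
--     names = ("team", "club", "squad", "球队", "俱乐部")
--     fallback = (-1, "")
--     for idx, header in enumerate(headers):
--         normalized = normalize_header_name(header)
--         if normalized in names:
--             return idx, header
--         if fallback[0] == -1 and any(k in normalized for k in names):
--             fallback = (idx, header)
--     return fallback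
-- ===== Notes on version B (the rewrite author's own statement) =====
-- stated objective: simpler
-- what changed: Replaces A's two full ordered passes (exact match, then keyword containment) with a single traversal that returns immediately on an exact match and remembers the first keyword hit as a fallback.
import Mathlib
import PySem

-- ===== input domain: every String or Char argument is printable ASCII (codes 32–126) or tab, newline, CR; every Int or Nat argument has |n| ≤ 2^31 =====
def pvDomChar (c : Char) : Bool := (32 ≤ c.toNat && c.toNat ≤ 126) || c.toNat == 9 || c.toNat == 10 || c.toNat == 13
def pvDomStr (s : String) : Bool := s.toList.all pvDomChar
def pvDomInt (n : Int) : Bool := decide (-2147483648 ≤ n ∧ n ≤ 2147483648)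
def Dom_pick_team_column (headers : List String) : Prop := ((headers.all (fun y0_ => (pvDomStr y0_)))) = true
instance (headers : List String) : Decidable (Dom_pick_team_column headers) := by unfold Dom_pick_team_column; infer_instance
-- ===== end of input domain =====

-- B collapses A's two ordered passes into one traversal with a remembered first-keyword fallback; objective: simpler.

-- ===== PORT A =====

-- normalize_header_name: str(value or "").strip().lower().replace("_", " "), then " ".join(split())
def pvNormalize (s : String) : String :=
  PySem.Str.join " " (PySem.Str.split₀ (PySem.Str.replace (PySem.Str.lower (PySem.Str.strip s)) "_" " "))

def pvExact (n : String) : Bool :=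
  n == "team" || n == "club" || n == "squad" || n == "球队" || n == "俱乐部"

def pvKw (n : String) : Bool :=
  PySem.Str.isIn "team" n || PySem.Str.isIn "club" n || PySem.Str.isIn "squad" n ||
  PySem.Str.isIn "球队" n || PySem.Str.isIn "俱乐部" n

-- first loop of A: exact match over enumerate(headers)
def pvLoopA1 (i : Int) : List String → Option (Int × String)
  | [] => none
  | h :: t => if pvExact (pvNormalize h) then some (i, h) else pvLoopA1 (i + 1) t

-- second loop of A: keyword containment over enumerate(headers)
def pvLoopA2 (i : Int) : List String → Option (Int × String)
  | [] => none
  | h :: t => if pvKw (pvNormalize h) then some (i, h) else pvLoopA2 (i + 1) t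

def pick_team_column (headers : List String) : Int × String :=
  match pvLoopA1 0 headers with
  | some r => r
  | none =>
    match pvLoopA2 0 headers with
    | some r => r
    | none => (-1, "")

-- ===== PORT B =====

-- single pass: return on exact match, remember first keyword hit as fallback
def pvLoopB (i : Int) (fb : Int × String) : List String → Int × String
  | [] => fb
  | h :: t =>
    let n := pvNormalize h
    if pvExact n then (i, h)
    else if fb.1 == -1 && pvKw n then pvLoopB (i + 1) (i, h) t
    else pvLoopB (i + 1) fb t

def pick_team_column_alt (headers : List String) : Int × String :=
  pvLoopB 0 (-1, "") headers

-- ===== PRECONDITION & SPEC =====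

def Spec_pick_team_column (headers : List String) (out : Int × String) : Prop :=
  out = pick_team_column_alt headers
instance (headers : List String) (out : Int × String) : Decidable (Spec_pick_team_column headers out) := by
  unfold Spec_pick_team_column; infer_instance

-- ===== CLAIM =====

def Claim_equal_pick_team_column : Prop :=
  ∀ (headers : List String), Dom_pick_team_column headers →
    Spec_pick_team_column headers (pick_team_column headers)

-- ===== LEMMAS AND PROOFS =====

-- With a recorded fallback (fb.1 ≠ -1), B returns it unless an exact match appears.
theorem pvLoopB_fb (t : List String) : ∀ (i : Int) (fb : Int × String), fb.1 ≠ -1 →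
    pvLoopB i fb t = (pvLoopA1 i t).getD fb := by
  induction t with
  | nil => intro i fb _; rfl
  | cons h t ih =>
    intro i fb hfb
    simp only [pvLoopB, pvLoopA1]
    split
    · rfl
    · rw [if_neg (by simp [hfb]), ih _ _ hfb]

-- With no fallback yet, B computes exactly A's two-pass result of the remaining list.
theorem pvLoopB_none (t : List String) : ∀ (i : Int), 0 ≤ i →
    pvLoopB i (-1, "") t =
      ((pvLoopA1 i t).getD ((pvLoopA2 i t).getD (-1, ""))) := by
  induction t with
  | nil => intro i _; rfl
  | cons h t ih =>
    intro i hi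
    simp only [pvLoopB, pvLoopA1, pvLoopA2]
    split
    · rfl
    · by_cases hk : pvKw (pvNormalize h) = true
      · rw [if_pos (by simp [hk]), pvLoopB_fb t (i + 1) (i, h) (by simp; omega)]
        simp [hk]
      · rw [if_neg (by simp [hk]), ih (i + 1) (by omega)]
        simp [hk]

-- ===== VERDICT =====

theorem pick_team_column_spec : Claim_equal_pick_team_column := by
  intro headers _
  unfold Spec_pick_team_column pick_team_column pick_team_column_alt
  rw [pvLoopB_none headers 0 le_rfl]
  cases pvLoopA1 0 headers <;> cases pvLoopA2 0 headers <;> rfl
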